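-- pv_equiv track=rewrite | github.com/sebkeil/KR-Project01-Group02 | final/simplification.py | unit_clauses
-- ===== SOURCE A (Python) =====
-- def unit_clauses(clauses, assigns, validity_check):
--     varbs = []
--
--     for literals in clauses:
--         if len(literals) == 1:
--             item = literals[0]
--             varbs.append(item)
--
--     for items in varbs:
--         if -items in varbs or -items in assigns:
--             validity_check = False
--
--     return assigns, validity_check
-- ===== SOURCE B (Python) =====
-- def unit_clauses(clauses, assigns, validity_check):
--     seen = set()
--     assigns_set = set(assigns)
--     for literals in clauses:
--         if len(literals) == 1:
--             l = literals[0]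
--             seen.add(l)
--             if -l in seen or -l in assigns_set:
--                 validity_check = False
--     return assigns, validity_check
-- ===== Notes on version B (the rewrite author's own statement) =====
-- stated objective: alternative
-- what changed: Replaced A's two-pass collect-then-rescan (build the full unit-literal list, then rescan it for each literal) by a single online pass over clauses maintaining a set of seen unit literals and a prebuilt set of assigns, testing each literal's negation against running state; avoids A's quadratic rescans of the unit list but was not measurably faster on the timing inputs.
import Mathlib
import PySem

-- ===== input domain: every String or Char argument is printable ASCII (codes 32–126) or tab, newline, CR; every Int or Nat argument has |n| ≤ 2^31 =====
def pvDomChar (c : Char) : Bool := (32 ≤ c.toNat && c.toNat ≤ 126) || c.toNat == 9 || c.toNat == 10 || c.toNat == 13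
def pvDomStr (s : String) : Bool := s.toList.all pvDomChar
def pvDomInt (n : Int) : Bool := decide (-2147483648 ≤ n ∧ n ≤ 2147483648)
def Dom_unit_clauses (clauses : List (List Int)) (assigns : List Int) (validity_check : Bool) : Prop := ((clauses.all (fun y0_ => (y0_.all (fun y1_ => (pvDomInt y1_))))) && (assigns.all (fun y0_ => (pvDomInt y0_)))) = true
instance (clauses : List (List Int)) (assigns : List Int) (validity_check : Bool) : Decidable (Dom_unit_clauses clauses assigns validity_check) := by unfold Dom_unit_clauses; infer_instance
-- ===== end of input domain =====

-- B replaces A's two-pass collect-then-rescan with one online pass keeping a set of seen unit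
-- literals and a prebuilt set of assigns (objective: alternative single-pass decomposition).

-- ===== PORT A =====
-- literals[0] under the guard len(literals) == 1 is the head of a nonempty list: headI is exact here
def unit_clauses (clauses : List (List Int)) (assigns : List Int) (validity_check : Bool) : List Int × Bool :=
  let varbs := clauses.foldl (fun acc literals =>
      if literals.length = 1 then acc ++ [literals.headI] else acc) []
  let vc := varbs.foldl (fun vc items =>
      if varbs.contains (-items) || assigns.contains (-items) then false else vc) validity_check
  (assigns, vc)

-- ===== PORT B =====
def unit_clauses_alt (clauses : List (List Int)) (assigns : List Int) (validity_check : Bool) : List Int × Bool :=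
  let assignsSet : PySem.Set Int := PySem.Set.ofList assigns
  let st := clauses.foldl (fun (st : PySem.Set Int × Bool) literals =>
      if literals.length = 1 then
        (PySem.Set.add st.1 literals.headI,
         if PySem.Set.contains (PySem.Set.add st.1 literals.headI) (-literals.headI)
            || PySem.Set.contains assignsSet (-literals.headI) then false else st.2)
      else st) ((PySem.Set.empty : PySem.Set Int), validity_check)
  (assigns, st.2)

-- ===== PRECONDITION & SPEC =====
def Spec_unit_clauses (clauses : List (List Int)) (assigns : List Int) (validity_check : Bool) (out : List Int × Bool) : Prop := out = unit_clauses_alt clauses assigns validity_check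
instance (clauses : List (List Int)) (assigns : List Int) (validity_check : Bool) (out : List Int × Bool) : Decidable (Spec_unit_clauses clauses assigns validity_check out) := by unfold Spec_unit_clauses; infer_instance

-- ===== CLAIM (what is proved, stated in full; the proofs are below) =====
def Claim_equal_unit_clauses : Prop := ∀ (clauses : List (List Int)) (assigns : List Int) (validity_check : Bool), Dom_unit_clauses clauses assigns validity_check → Spec_unit_clauses clauses assigns validity_check (unit_clauses clauses assigns validity_check)

-- ===== LEMMAS AND PROOFS =====

-- A's first loop builds exactly the heads of the unit clauses, in order.
theorem varbs_eq (cs : List (List Int)) (acc : List Int) :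
    cs.foldl (fun acc literals => if literals.length = 1 then acc ++ [literals.headI] else acc) acc
      = acc ++ (cs.filter (fun l => l.length = 1)).map List.headI := by
  induction cs generalizing acc with
  | nil => simp
  | cons c cs ih =>
    by_cases h : c.length = 1 <;> simp [h, ih]

-- A's second loop: set-to-false fold is 'initial && no element satisfies p'.
theorem flagA_eq (L : List Int) (p : Int → Bool) (v : Bool) :
    L.foldl (fun vc x => if p x then false else vc) v = (v && !(L.any p)) := by
  induction L generalizing v with
  | nil => simp
  | cons a L ih =>
    rw [List.foldl_cons, ih]
    cases h : p a <;> simp [h]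

-- B's single loop skips non-unit clauses: it is a fold over the same unit-literal list.
theorem foldB_eq (g : PySem.Set Int × Bool → Int → PySem.Set Int × Bool)
    (cs : List (List Int)) (s : PySem.Set Int × Bool) :
    cs.foldl (fun st literals => if literals.length = 1 then g st literals.headI else st) s
      = ((cs.filter (fun l => l.length = 1)).map List.headI).foldl g s := by
  induction cs generalizing s with
  | nil => simp
  | cons c cs ih =>
    by_cases h : c.length = 1 <;> simp [h, ih]

-- the conflict test B performs online, as a recursion over the unit-literal list
def bConf (aset : List Int) : PySem.Set Int → List Int → Bool
  | _, [] => false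
  | seen, l :: rest =>
      ((PySem.Set.contains (PySem.Set.add seen l) (-l) || PySem.Set.contains aset (-l))
        || bConf aset (PySem.Set.add seen l) rest)

theorem flagB_eq (aset : List Int) (U : List Int) (seen : PySem.Set Int) (v : Bool) :
    (U.foldl (fun (st : PySem.Set Int × Bool) x =>
        (PySem.Set.add st.1 x,
         if PySem.Set.contains (PySem.Set.add st.1 x) (-x) || PySem.Set.contains aset (-x)
         then false else st.2)) (seen, v)).2
      = (v && !(bConf aset seen U)) := by
  induction U generalizing seen v with
  | nil => simp [bConf]
  | cons l U ih =>
    rw [List.foldl_cons, ih, bConf]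
    cases h : (PySem.Set.contains (PySem.Set.add seen l) (-l) || PySem.Set.contains aset (-l)) <;>
      simp_all

-- crux: the online conflict test over a growing seen-set detects exactly the conflicts that
-- A's rescan of the full list detects
theorem bConf_iff (aset : List Int) (U : List Int) (P : List Int) (seen : PySem.Set Int)
    (hseen : ∀ x : Int, x ∈ seen ↔ x ∈ P) :
    bConf aset seen U = true ↔ ∃ x ∈ U, (-x) ∈ P ∨ (-x) ∈ U ∨ (-x) ∈ aset := by
  induction U generalizing P seen with
  | nil => simp [bConf]
  | cons l U ih =>
    have hseen' : ∀ x : Int, x ∈ PySem.Set.add seen l ↔ x ∈ l :: P := by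
      intro x; simp [PySem.Set.mem_add, hseen, List.mem_cons, or_comm]
    rw [bConf]
    simp only [Bool.or_eq_true, ih (l :: P) (PySem.Set.add seen l) hseen']
    constructor
    · rintro ((h | h) | ⟨x, hx, h⟩)
      · simp only [PySem.Set.contains, List.contains_iff_mem, hseen' (-l), List.mem_cons] at h
        rcases h with h | h
        · exact ⟨l, by simp, Or.inr (Or.inl (by simp [h]))⟩
        · exact ⟨l, by simp, Or.inl h⟩
      · simp only [PySem.Set.contains, List.contains_iff_mem] at h
        exact ⟨l, by simp, Or.inr (Or.inr h)⟩
      · rcases h with h | h | h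
        · rcases List.mem_cons.mp h with h | h
          · exact ⟨x, by simp [hx], Or.inr (Or.inl (by simp [h]))⟩
          · exact ⟨x, by simp [hx], Or.inl h⟩
        · exact ⟨x, by simp [hx], Or.inr (Or.inl (by simp [h]))⟩
        · exact ⟨x, by simp [hx], Or.inr (Or.inr h)⟩
    · rintro ⟨x, hx, h⟩
      rcases List.mem_cons.mp hx with rfl | hx
      · rcases h with h | h | h
        · exact Or.inl (Or.inl (by simp [PySem.Set.contains, hseen' (-x), h]))
        · rcases List.mem_cons.mp h with h | h
          · exact Or.inl (Or.inl (by simp [PySem.Set.contains, hseen' (-x), h]))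
          · refine Or.inr ⟨-x, h, Or.inl ?_⟩
            simp
        · exact Or.inl (Or.inr (by simp [PySem.Set.contains, h]))
      · rcases h with h | h | h
        · exact Or.inr ⟨x, hx, Or.inl (by simp [h])⟩
        · rcases List.mem_cons.mp h with h | h
          · exact Or.inr ⟨x, hx, Or.inl (by simp [h])⟩
          · exact Or.inr ⟨x, hx, Or.inr (Or.inl h)⟩
        · exact Or.inr ⟨x, hx, Or.inr (Or.inr h)⟩

-- ===== VERDICT (by name: the statement is the Claim_ definition above) =====
theorem unit_clauses_spec : Claim_equal_unit_clauses := by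
  intro clauses assigns validity_check _
  unfold Spec_unit_clauses unit_clauses unit_clauses_alt
  dsimp only
  rw [foldB_eq (fun st x =>
      (PySem.Set.add st.1 x,
       if PySem.Set.contains (PySem.Set.add st.1 x) (-x)
          || PySem.Set.contains (PySem.Set.ofList assigns) (-x) then false else st.2)),
    varbs_eq, flagA_eq, flagB_eq]
  set U := (clauses.filter (fun l => l.length = 1)).map List.headI with hU
  simp only [List.nil_append, Prod.mk.injEq, true_and]
  congr 2
  rw [Bool.eq_iff_iff]
  rw [bConf_iff (PySem.Set.ofList assigns) U [] PySem.Set.empty (by simp [PySem.Set.empty])]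
  simp [List.any_eq_true, PySem.Set.mem_ofList]
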